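-- pv_equiv track=rewrite | github.com/partyrobotics/bartendro | ui/bartendro/router/pack7.py | pack_7bit
-- ===== SOURCE A (Python) =====
-- def pack_7bit(data):
--     buffer = 0
--     bitcount = 0
--     out = ""
--
--     while True:
--         if bitcount < 7:
--             buffer <<= 8
--             buffer |= ord(data[0])
--             data = data[1:]
--             bitcount += 8
--         out += chr(buffer >> (bitcount - 7))
--         buffer &= (1 << (bitcount - 7)) - 1
--         bitcount -= 7
--
--         if len(data) == 0: break
--
--     out += chr(buffer << (7 - bitcount))
--     return out
-- ===== SOURCE B (Python) =====
-- def pack_7bit(data):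
--     out = []
--     buffer = 0
--     bitcount = 0
--     for ch in data:
--         buffer = (buffer << 8) | ord(ch)
--         bitcount += 8
--         while bitcount >= 7:
--             bitcount -= 7
--             out.append(chr((buffer >> bitcount) & 0x7F))
--             buffer &= (1 << bitcount) - 1
--     if bitcount:
--         out.append(chr(buffer << (7 - bitcount)))
--     return "".join(out)
-- ===== Notes on version B (the rewrite author's own statement) =====
-- stated objective: faster
-- what changed: B makes a single pass with an index-free for-loop over the characters (no data = data[1:] re-slicing) and accumulates output chunks in a list joined once, draining all available 7-bit chunks with an inner while after each byte, instead of A's while-True loop that slices the string on every byte and concatenates to a string.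
import Mathlib
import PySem

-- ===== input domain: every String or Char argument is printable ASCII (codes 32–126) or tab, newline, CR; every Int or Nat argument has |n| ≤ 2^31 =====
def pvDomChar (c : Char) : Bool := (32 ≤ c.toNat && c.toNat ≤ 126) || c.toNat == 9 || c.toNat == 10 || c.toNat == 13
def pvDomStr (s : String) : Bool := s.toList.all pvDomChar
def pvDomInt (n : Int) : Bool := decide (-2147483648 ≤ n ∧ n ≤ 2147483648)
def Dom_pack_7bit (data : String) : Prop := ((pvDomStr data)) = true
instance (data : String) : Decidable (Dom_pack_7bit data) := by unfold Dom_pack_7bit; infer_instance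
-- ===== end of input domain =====

-- B replaces A's per-byte string slicing (data = data[1:]) and string += by a single
-- indexed pass that drains all available 7-bit chunks after each byte into a list joined once.

-- ===== PORT A =====
-- A's while-True loop; buffer/bitcount are never negative in Python, so they are Nat here.
-- On data = "" Python raises IndexError at data[0]; the [] branch there is unreachable under Pre_.
def pack7A_go (data : List Char) (buffer bitcount : Nat) (out : List Char) : List Char :=
  if bitcount < 7 then
    match data with
    | [] => out   -- IndexError in Python; excluded by Pre_pack_7bit
    | c :: rest =>
      let buffer := (buffer <<< 8) ||| c.toNat
      let bitcount := bitcount + 8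
      let out := out ++ [Char.ofNat (buffer >>> (bitcount - 7))]
      let buffer := buffer &&& ((1 <<< (bitcount - 7)) - 1)
      let bitcount := bitcount - 7
      if rest.isEmpty then out ++ [Char.ofNat (buffer <<< (7 - bitcount))]
      else pack7A_go rest buffer bitcount out
  else
    let out := out ++ [Char.ofNat (buffer >>> (bitcount - 7))]
    let buffer := buffer &&& ((1 <<< (bitcount - 7)) - 1)
    let bitcount := bitcount - 7
    if data.isEmpty then out ++ [Char.ofNat (buffer <<< (7 - bitcount))]
    else pack7A_go data buffer bitcount out
termination_by 2 * data.length + (bitcount + 1 - 7)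
decreasing_by
  · simp; omega
  · simp; omega

def pack_7bit (data : String) : String :=
  String.ofList (pack7A_go data.toList 0 0 [])

-- ===== PORT B =====
-- inner 'while bitcount >= 7' loop of B
def pack7B_inner (buffer bitcount : Nat) (out : List Char) : Nat × Nat × List Char :=
  if 7 ≤ bitcount then
    let bitcount' := bitcount - 7
    let out := out ++ [Char.ofNat ((buffer >>> bitcount') &&& 0x7F)]
    let buffer := buffer &&& ((1 <<< bitcount') - 1)
    pack7B_inner buffer bitcount' out
  else (buffer, bitcount, out)
termination_by bitcount
decreasing_by omega

-- the 'for ch in data' loop of B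
def pack7B_go (cs : List Char) (buffer bitcount : Nat) (out : List Char) : Nat × Nat × List Char :=
  match cs with
  | [] => (buffer, bitcount, out)
  | c :: rest =>
    let st := pack7B_inner ((buffer <<< 8) ||| c.toNat) (bitcount + 8) out
    pack7B_go rest st.1 st.2.1 st.2.2

def pack_7bit_alt (data : String) : String :=
  let st := pack7B_go data.toList 0 0 []
  if st.2.1 ≠ 0 then String.ofList (st.2.2 ++ [Char.ofNat (st.1 <<< (7 - st.2.1))])
  else String.ofList st.2.2

-- ===== PRECONDITION & SPEC =====
-- Pre_ excludes exactly the empty string, on which A raises IndexError (data[0]).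
def Pre_pack_7bit (data : String) : Prop := data ≠ ""
instance (data : String) : Decidable (Pre_pack_7bit data) := by unfold Pre_pack_7bit; infer_instance
def pvWitness_pack_7bit : String := "Hi"


def Spec_pack_7bit (data : String) (out : String) : Prop := out = pack_7bit_alt data
instance (data : String) (out : String) : Decidable (Spec_pack_7bit data out) := by unfold Spec_pack_7bit; infer_instance

-- ===== CLAIM (what is proved, stated in full; the proofs are below) =====
def Claim_equal_pack_7bit : Prop := ∀ (data : String), Dom_pack_7bit data → Pre_pack_7bit data → Spec_pack_7bit data (pack_7bit data)
-- ===== LEMMAS AND PROOFS =====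

lemma pv_and_mask (x k : Nat) : x &&& ((1 <<< k) - 1) = x % 2 ^ k := by
  rw [Nat.shiftLeft_eq, one_mul, Nat.and_two_pow_sub_one_eq_mod]

lemma pv_and127 (x : Nat) : x &&& 127 = x % 128 := by
  simpa using Nat.and_two_pow_sub_one_eq_mod x 7

lemma pv_shr (a b : Nat) : a >>> b = a / 2 ^ b := Nat.shiftRight_eq_div_pow a b

lemma pack7_key (data : List Char) (buffer bitcount : Nat) (out : List Char)
    (hne : data ≠ []) (hch : ∀ c ∈ data, c.toNat < 128)
    (hk : bitcount < 7) (hb : buffer < 2 ^ bitcount) :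
    pack7A_go data buffer bitcount out =
      (let st := pack7B_go data buffer bitcount out
       if st.2.1 ≠ 0 then st.2.2 ++ [Char.ofNat (st.1 <<< (7 - st.2.1))] else st.2.2) := by
  induction data generalizing buffer bitcount out with
  | nil => exact absurd rfl hne
  | cons c rest ih =>
    have hc : c.toNat < 128 := hch c (List.mem_cons_self)
    have hrest : ∀ c' ∈ rest, c'.toNat < 128 := fun c' h => hch c' (List.mem_cons_of_mem _ h)
    have hBlt : (buffer <<< 8) ||| c.toNat < 2 ^ (bitcount + 8) := by
      apply Nat.or_lt_two_pow
      · rw [Nat.shiftLeft_eq, pow_add]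
        exact Nat.mul_lt_mul_of_lt_of_le hb (le_refl _) (by positivity)
      · calc c.toNat < 128 := hc
          _ = 2 ^ 7 := rfl
          _ ≤ 2 ^ (bitcount + 8) := Nat.pow_le_pow_right (by norm_num) (by omega)
    set B := (buffer <<< 8) ||| c.toNat with hBdef
    have hchunk1 : B >>> (bitcount + 1) < 128 := by
      rw [pv_shr]
      apply Nat.div_lt_of_lt_mul
      calc B < 2 ^ (bitcount + 8) := hBlt
        _ = 2 ^ (bitcount + 1) * 128 := by
            rw [show bitcount + 8 = (bitcount + 1) + 7 by omega, pow_add]; norm_num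
    have hmod1 : B >>> (bitcount + 1) % 128 = B >>> (bitcount + 1) := Nat.mod_eq_of_lt hchunk1
    have hA : pack7A_go (c :: rest) buffer bitcount out =
        (if rest.isEmpty then
          (out ++ [Char.ofNat (B >>> (bitcount + 1))]) ++
            [Char.ofNat ((B % 2 ^ (bitcount + 1)) <<< (7 - (bitcount + 1)))]
        else pack7A_go rest (B % 2 ^ (bitcount + 1)) (bitcount + 1)
               (out ++ [Char.ofNat (B >>> (bitcount + 1))])) := by
      rw [pack7A_go]
      simp only [if_pos hk]
      rw [← hBdef]
      simp only [show bitcount + 8 - 7 = bitcount + 1 by omega, pv_and_mask]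
    -- B side: first inner step
    have hstep1 : pack7B_inner B (bitcount + 8) out =
        pack7B_inner (B % 2 ^ (bitcount + 1)) (bitcount + 1)
          (out ++ [Char.ofNat (B >>> (bitcount + 1))]) := by
      rw [pack7B_inner]
      simp only [if_pos (by omega : 7 ≤ bitcount + 8)]
      simp only [show bitcount + 8 - 7 = bitcount + 1 by omega, pv_and_mask, pv_and127, hmod1]
    by_cases h6 : bitcount = 6
    · -- bitcount = 6 : the inner while drains two chunks
      subst h6
      have hB7 : B % 2 ^ 7 < 128 := Nat.mod_lt _ (by norm_num)
      have hstep2 : pack7B_inner (B % 2 ^ (6 + 1)) (6 + 1) (out ++ [Char.ofNat (B >>> (6 + 1))]) =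
          (0, 0, (out ++ [Char.ofNat (B >>> (6 + 1))]) ++ [Char.ofNat (B % 2 ^ 7)]) := by
        rw [pack7B_inner]
        simp only [show ((6:Nat) + 1) = 7 from rfl, if_pos (le_refl 7),
          show (7:Nat) - 7 = 0 from rfl, Nat.shiftRight_zero, pv_and_mask, pv_and127,
          Nat.mod_eq_of_lt hB7, pow_zero, Nat.mod_one]
        rw [pack7B_inner]
        simp only [if_neg (by omega : ¬ (7:Nat) ≤ 0)]
      have hBside : pack7B_go (c :: rest) buffer 6 out =
          pack7B_go rest 0 0 ((out ++ [Char.ofNat (B >>> (6 + 1))]) ++ [Char.ofNat (B % 2 ^ 7)]) := by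
        rw [pack7B_go]
        simp only [← hBdef, hstep1, hstep2]
      rw [hA, hBside]
      cases hre : rest with
      | nil =>
        rw [if_pos (by simp), pack7B_go]
        simp only [ne_eq, not_true_eq_false, reduceIte]
        simp only [show ((6:Nat) + 1) = 7 from rfl, show (7:Nat) - 7 = 0 from rfl,
          Nat.shiftLeft_zero]
      | cons d ds =>
        subst hre
        rw [if_neg (by simp)]
        have hA2 : pack7A_go (d :: ds) (B % 2 ^ (6 + 1)) (6 + 1)
            (out ++ [Char.ofNat (B >>> (6 + 1))]) =
            pack7A_go (d :: ds) 0 0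
              ((out ++ [Char.ofNat (B >>> (6 + 1))]) ++ [Char.ofNat (B % 2 ^ 7)]) := by
          rw [pack7A_go]
          simp only [show ¬((6:Nat) + 1 < 7) by omega, reduceIte,
            show ((6:Nat) + 1 - 7) = 0 from rfl, Nat.shiftRight_zero, pv_and_mask,
            show ((6:Nat) + 1) = 7 from rfl, pow_zero, Nat.mod_one,
            List.isEmpty_cons]
          norm_num
        rw [hA2]
        exact ih 0 0 _ (List.cons_ne_nil d ds) hrest (by norm_num) (by norm_num)
    · -- bitcount < 6 : exactly one chunk drained
      have hstop : pack7B_inner (B % 2 ^ (bitcount + 1)) (bitcount + 1)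
          (out ++ [Char.ofNat (B >>> (bitcount + 1))]) =
          (B % 2 ^ (bitcount + 1), bitcount + 1, out ++ [Char.ofNat (B >>> (bitcount + 1))]) := by
        rw [pack7B_inner]
        simp only [if_neg (by omega : ¬ 7 ≤ bitcount + 1)]
      have hBside : pack7B_go (c :: rest) buffer bitcount out =
          pack7B_go rest (B % 2 ^ (bitcount + 1)) (bitcount + 1)
            (out ++ [Char.ofNat (B >>> (bitcount + 1))]) := by
        rw [pack7B_go]
        simp only [← hBdef, hstep1, hstop]
      rw [hA, hBside]
      cases hre : rest with
      | nil =>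
        rw [if_pos (by simp), pack7B_go]
        simp only [ne_eq]
        rw [if_pos (by omega)]
      | cons d ds =>
        subst hre
        rw [if_neg (by simp)]
        exact ih (B % 2 ^ (bitcount + 1)) (bitcount + 1) _ (List.cons_ne_nil d ds)
          hrest (by omega) (Nat.mod_lt _ (by positivity))

theorem pack_7bit_spec : Claim_equal_pack_7bit := by
  intro data hdom hpre
  unfold Spec_pack_7bit pack_7bit pack_7bit_alt
  have hne : data.toList ≠ [] := by
    intro h
    apply hpre
    have := congrArg String.ofList h
    simpa using this
  have hch : ∀ c ∈ data.toList, c.toNat < 128 := by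
    intro c hc
    have := List.all_eq_true.mp hdom c hc
    simp only [pvDomChar, Bool.or_eq_true, Bool.and_eq_true, decide_eq_true_eq, beq_iff_eq] at this
    omega
  have := pack7_key data.toList 0 0 [] hne hch (by norm_num) (by norm_num)
  rw [this]
  simp only []
  split <;> rfl
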